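-- pv_equiv track=rewrite | github.com/JSebastianIEU/tik-tok-recommendation-system | src/recommendation/learning/retriever.py | _merge_candidate_memory
-- ===== SOURCE A (Python) =====
-- from typing import Any, Dict, Iterable, List, Optional, Sequence, Tuple
--
-- CREATOR_RETRIEVAL_MAX_MEMORY = 24
--
-- def _merge_candidate_memory(
--     primary: Dict[str, List[str]],
--     fallback: Dict[str, List[str]],
-- ) -> Dict[str, List[str]]:
--     out: Dict[str, List[str]] = {}
--     for key in ("positive_candidate_ids", "negative_candidate_ids"):
--         merged: List[str] = []
--         seen: set[str] = set()
--         for source in (primary.get(key, []), fallback.get(key, [])):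
--             for item in source:
--                 if item in seen:
--                     continue
--                 seen.add(item)
--                 merged.append(item)
--                 if len(merged) >= CREATOR_RETRIEVAL_MAX_MEMORY:
--                     break
--             if len(merged) >= CREATOR_RETRIEVAL_MAX_MEMORY:
--                 break
--         out[key] = merged
--     return out
-- ===== SOURCE B (Python) =====
-- from typing import Dict, List
--
-- CREATOR_RETRIEVAL_MAX_MEMORY = 24
--
-- def _take_unique(items: List[str], cap: int) -> List[str]:
--     """Recursive sieve: emit the head, delete every later copy of it, recurse
--     with the cap decremented. No seen-set, no slicing."""
--     if cap == 0 or not items: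
--         return []
--     head = items[0]
--     return [head] + _take_unique([x for x in items[1:] if x != head], cap - 1)
--
-- def _merge_candidate_memory(
--     primary: Dict[str, List[str]],
--     fallback: Dict[str, List[str]],
-- ) -> Dict[str, List[str]]:
--     return {
--         key: _take_unique(primary.get(key, []) + fallback.get(key, []),
--                           CREATOR_RETRIEVAL_MAX_MEMORY)
--         for key in ("positive_candidate_ids", "negative_candidate_ids")
--     }
-- ===== Notes on version B (the rewrite author's own statement) =====
-- stated objective: alternative
-- what changed: B replaces A's stateful seen-set loop with interleaved cap checks and early breaks by a recursive Eratosthenes-style sieve: emit the head of the concatenated list, filter every later copy of it out of the tail, and recurse with the cap decremented - no seen set, no cap comparison against the output length, no slicing.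
import Mathlib
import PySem

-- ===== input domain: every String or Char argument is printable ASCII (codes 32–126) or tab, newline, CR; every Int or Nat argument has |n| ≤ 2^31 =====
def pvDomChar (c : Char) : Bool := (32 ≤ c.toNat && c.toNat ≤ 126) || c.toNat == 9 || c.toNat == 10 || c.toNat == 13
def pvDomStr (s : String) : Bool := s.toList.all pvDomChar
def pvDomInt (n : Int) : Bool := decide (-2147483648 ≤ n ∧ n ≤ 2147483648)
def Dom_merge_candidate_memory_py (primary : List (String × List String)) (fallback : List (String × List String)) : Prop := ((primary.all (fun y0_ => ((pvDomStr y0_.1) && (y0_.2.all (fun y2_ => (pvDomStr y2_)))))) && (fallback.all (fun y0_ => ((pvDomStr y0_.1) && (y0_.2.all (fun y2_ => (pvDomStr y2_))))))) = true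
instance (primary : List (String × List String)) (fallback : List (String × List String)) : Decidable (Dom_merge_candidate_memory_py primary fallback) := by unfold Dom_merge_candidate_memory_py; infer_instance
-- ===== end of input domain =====

-- B replaces A's fused seen-set loop (dedup + cap + early breaks) by a recursive
-- sieve: emit the head, filter its later copies out of the tail, decrement the cap.

-- ===== PORT A =====
-- inner 'for item in source' loop: carries (seen, merged); returns early when the cap is hit
def pvInnerA (seen : PySem.Set String) (merged : List String) : List String → PySem.Set String × List String
  | [] => (seen, merged)
  | item :: rest =>
    if PySem.Set.contains seen item then pvInnerA seen merged rest
    else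
      let seen' := PySem.Set.add seen item
      let merged' := merged ++ [item]
      if 24 ≤ merged'.length then (seen', merged')
      else pvInnerA seen' merged' rest

-- 'for source in (primary.get(key,[]), fallback.get(key,[]))' with the post-source break
def pvMergeKeyA (src1 src2 : List String) : List String :=
  let r1 := pvInnerA PySem.Set.empty [] src1
  if 24 ≤ r1.2.length then r1.2
  else (pvInnerA r1.1 r1.2 src2).2

def merge_candidate_memory_py (primary : List (String × List String)) (fallback : List (String × List String)) : List (String × List String) :=
  let p := PySem.Dict.mk primary
  let f := PySem.Dict.mk fallback
  let out : PySem.Dict String (List String) := PySem.Dict.empty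
  let out := out.insert "positive_candidate_ids"
      (pvMergeKeyA (p.getD "positive_candidate_ids" []) (f.getD "positive_candidate_ids" []))
  let out := out.insert "negative_candidate_ids"
      (pvMergeKeyA (p.getD "negative_candidate_ids" []) (f.getD "negative_candidate_ids" []))
  out.items

-- ===== PORT B =====
-- _take_unique(items, cap): head, then recurse on the tail with the head removed
def pvTakeUnique : Nat → List String → List String
  | 0, _ => []
  | _ + 1, [] => []
  | cap + 1, head :: rest => head :: pvTakeUnique cap (rest.filter (fun x => x != head))

def merge_candidate_memory_py_alt (primary : List (String × List String)) (fallback : List (String × List String)) : List (String × List String) :=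
  let p := PySem.Dict.mk primary
  let f := PySem.Dict.mk fallback
  let out : PySem.Dict String (List String) := PySem.Dict.empty
  let out := out.insert "positive_candidate_ids"
      (pvTakeUnique 24 (p.getD "positive_candidate_ids" [] ++ f.getD "positive_candidate_ids" []))
  let out := out.insert "negative_candidate_ids"
      (pvTakeUnique 24 (p.getD "negative_candidate_ids" [] ++ f.getD "negative_candidate_ids" []))
  out.items

-- ===== PRECONDITION & SPEC =====
def Spec_merge_candidate_memory_py (primary : List (String × List String)) (fallback : List (String × List String)) (out : List (String × List String)) : Prop := out = merge_candidate_memory_py_alt primary fallback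
instance (primary : List (String × List String)) (fallback : List (String × List String)) (out : List (String × List String)) : Decidable (Spec_merge_candidate_memory_py primary fallback out) := by unfold Spec_merge_candidate_memory_py; infer_instance

-- ===== CLAIM (what is proved, stated in full; the proofs are below) =====
def Claim_equal_merge_candidate_memory_py : Prop := ∀ (primary : List (String × List String)) (fallback : List (String × List String)), Dom_merge_candidate_memory_py primary fallback → Spec_merge_candidate_memory_py primary fallback (merge_candidate_memory_py primary fallback)

-- ===== LEMMAS AND PROOFS =====

-- dedup of the suffix relative to an already-seen set
def pvDedupGo (seen : PySem.Set String) : List String → List String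
  | [] => []
  | x :: xs => if PySem.Set.contains seen x then pvDedupGo seen xs
               else x :: pvDedupGo (PySem.Set.add seen x) xs

theorem pvNotMem {seen : PySem.Set String} {x : String}
    (h : ¬ PySem.Set.contains seen x = true) : x ∉ seen :=
  fun hm => h ((PySem.Set.contains_iff seen x).mpr hm)

theorem pvFoldl_add_eq (xs : List String) (seen : PySem.Set String) :
    xs.foldl PySem.Set.add seen = seen ++ pvDedupGo seen xs := by
  induction xs generalizing seen with
  | nil => simp [pvDedupGo]
  | cons x xs ih =>
    simp only [List.foldl, pvDedupGo]
    by_cases h : PySem.Set.contains seen x = true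
    · rw [if_pos h, PySem.Set.add_of_mem ((PySem.Set.contains_iff seen x).mp h)]
      exact ih seen
    · rw [if_neg h, PySem.Set.add_of_not_mem (pvNotMem h), ih]
      simp

theorem pvDedup_eq (xs : List String) : PySem.List.dedup xs = pvDedupGo [] xs := by
  have := pvFoldl_add_eq xs []
  simpa [PySem.List.dedup, PySem.Set.ofList, PySem.Set.ofList_eq_foldl] using this

theorem pvDedupGo_append (xs ys : List String) (seen : PySem.Set String) :
    pvDedupGo seen (xs ++ ys) =
      pvDedupGo seen xs ++ pvDedupGo (seen ++ pvDedupGo seen xs) ys := by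
  induction xs generalizing seen with
  | nil => simp [pvDedupGo]
  | cons x xs ih =>
    simp only [List.cons_append, pvDedupGo]
    by_cases h : PySem.Set.contains seen x = true
    · rw [if_pos h, if_pos h]
      exact ih seen
    · rw [if_neg h, if_neg h, ih, PySem.Set.add_of_not_mem (pvNotMem h)]
      simp [List.append_assoc]

theorem pvInnerA_val (xs : List String) (seen : PySem.Set String) (merged : List String)
    (h : merged.length < 24) :
    (pvInnerA seen merged xs).2 = (merged ++ pvDedupGo seen xs).take 24 := by
  induction xs generalizing seen merged with
  | nil =>
    simp [pvInnerA, pvDedupGo, List.take_of_length_le (Nat.le_of_lt h)]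
  | cons x xs ih =>
    simp only [pvInnerA, pvDedupGo]
    by_cases hc : PySem.Set.contains seen x = true
    · rw [if_pos hc, if_pos hc]
      exact ih seen merged h
    · rw [if_neg hc, if_neg hc]
      by_cases hlen : 24 ≤ (merged ++ [x]).length
      · rw [if_pos hlen]
        have h24 : (merged ++ [x]).length = 24 := by
          simp at hlen ⊢; omega
        have hsplit : (merged ++ x :: pvDedupGo (PySem.Set.add seen x) xs)
            = (merged ++ [x]) ++ pvDedupGo (PySem.Set.add seen x) xs := by
          simp
        rw [hsplit, List.take_append_of_le_length (by omega),
            List.take_of_length_le (by omega)]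
      · rw [if_neg hlen, ih (PySem.Set.add seen x) (merged ++ [x]) (by simp at hlen ⊢; omega)]
        simp

theorem pvInnerA_full (xs : List String) (seen : PySem.Set String) (merged : List String)
    (h : (merged ++ pvDedupGo seen xs).length < 24) :
    pvInnerA seen merged xs = (seen ++ pvDedupGo seen xs, merged ++ pvDedupGo seen xs) := by
  induction xs generalizing seen merged with
  | nil => simp [pvInnerA, pvDedupGo]
  | cons x xs ih =>
    simp only [pvInnerA, pvDedupGo] at h ⊢
    by_cases hc : PySem.Set.contains seen x = true
    · simp only [if_pos hc] at h ⊢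
      exact ih seen merged h
    · simp only [if_neg hc] at h ⊢
      have hlen : ¬ 24 ≤ (merged ++ [x]).length := by
        simp at h ⊢; omega
      rw [if_neg hlen, ih (PySem.Set.add seen x) (merged ++ [x]) (by simp at h ⊢; omega),
          PySem.Set.add_of_not_mem (pvNotMem hc)]
      simp [List.append_assoc]

-- A per key equals dedup-then-take-24
theorem pvMergeKeyA_eq (src1 src2 : List String) :
    pvMergeKeyA src1 src2 = (PySem.List.dedup (src1 ++ src2)).take 24 := by
  unfold pvMergeKeyA
  rw [pvDedup_eq, pvDedupGo_append]
  simp only [List.nil_append]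
  set d1 := pvDedupGo [] src1 with hd1
  have hval : (pvInnerA PySem.Set.empty [] src1).2 = d1.take 24 := by
    have := pvInnerA_val src1 PySem.Set.empty [] (by simp)
    simpa [PySem.Set.empty] using this
  by_cases hbig : 24 ≤ d1.length
  · rw [hval, if_pos (by simp [List.length_take]; omega),
        List.take_append_of_le_length hbig]
  · have hsmall : d1.length < 24 := by omega
    have hfull : pvInnerA PySem.Set.empty [] src1 = (d1, d1) := by
      have := pvInnerA_full src1 PySem.Set.empty [] (by simpa using hsmall)
      simpa [PySem.Set.empty] using this
    rw [hfull, if_neg (by simpa using hsmall)]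
    exact pvInnerA_val src2 d1 d1 hsmall

-- contains after an add, as a Bool identity
theorem pvContainsAdd (seen : PySem.Set String) (x a : String) :
    (!PySem.Set.contains (PySem.Set.add seen x) a) = ((a != x) && !PySem.Set.contains seen a) := by
  by_cases h1 : a ∈ seen <;> by_cases h2 : a = x <;>
    simp [PySem.Set.mem_add, h1, h2, Bool.and_comm]

-- the sieve on the not-yet-seen elements equals dedupGo truncated to cap
theorem pvSieve_eq (xs : List String) (cap : Nat) (seen : PySem.Set String) :
    pvTakeUnique cap (xs.filter (fun y => !PySem.Set.contains seen y))
      = (pvDedupGo seen xs).take cap := by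
  induction xs generalizing cap seen with
  | nil => cases cap <;> simp [pvTakeUnique, pvDedupGo]
  | cons x xs ih =>
    simp only [List.filter, pvDedupGo]
    by_cases hc : PySem.Set.contains seen x = true
    · simp only [hc, Bool.not_true, if_true]
      exact ih cap seen
    · have hc' : PySem.Set.contains seen x = false := by
        cases hb : PySem.Set.contains seen x
        · rfl
        · exact absurd hb hc
      simp only [hc', Bool.not_false, Bool.false_eq_true, if_false]
      cases cap with
      | zero => simp [pvTakeUnique]
      | succ cap =>
        simp only [pvTakeUnique, List.take_succ_cons, List.cons.injEq, true_and]
        rw [List.filter_filter]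
        have hfun : (fun a => a != x && !PySem.Set.contains seen a)
            = (fun a => !PySem.Set.contains (PySem.Set.add seen x) a) := by
          funext a
          exact (pvContainsAdd seen x a).symm
        rw [hfun]
        exact ih cap (PySem.Set.add seen x)

-- B per key equals dedup-then-take-24 too
theorem pvTakeUnique_eq (src : List String) :
    pvTakeUnique 24 src = (PySem.List.dedup src).take 24 := by
  have h := pvSieve_eq src 24 []
  have hfilter : src.filter (fun y => !PySem.Set.contains [] y) = src := by
    simp [PySem.Set.contains]
  rw [hfilter] at h
  rw [h, pvDedup_eq]

-- ===== VERDICT (by name: the statement is the Claim_ definition above) =====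
theorem merge_candidate_memory_py_spec : Claim_equal_merge_candidate_memory_py := by
  intro primary fallback _
  unfold Spec_merge_candidate_memory_py merge_candidate_memory_py merge_candidate_memory_py_alt
  simp only [pvMergeKeyA_eq, pvTakeUnique_eq]
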